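/- GENERATED by mk_final_copies.py from the proof of the farm's unit `start_decoder.9b` (farm:start_decoder.9b.1: Proof.lean) as the
   re-elaboration sweep compiled it — do not edit. -/
import Asan.CheckWalk
import Vorbis.Spec.Units.start_decoder_9b

/-!
  Unit `start_decoder.9b`: a child of the split of segment `.9` of start_decoder (Vorbis/Spec/StartDecoder9.lean: the cut assertion
  `In9`, the claims, `Seg9.of_parts`). The walk is the farm worker's (unit start_decoder.9, attempt 1) over the carry layer of
  Vorbis/Spec/StartDecoder1.lean (`P1.sd2_carry`, `P1.frame_carry`, `P1.layout_facts`, `P1.wmax_ok`) and the exit lemmas of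
  `Vorbis.Spec.StartDecoder.S9` (`mid_exit`, `err_exit`, `err4_exit`).
-/

open X86 X86.User Asan Vorbis Vorbis.Spec Vorbis.Spec.StartDecoder Vorbis.Spec.StartDecoder.P1 Vorbis.Spec.StartDecoder.S9

set_option maxRecDepth 4000
set_option maxHeartbeats 4000000

namespace Vorbis.Spec.start_decoder_9b

/-- **Segment `.9`, part b** (0x114199 … 0x1141ab, stub 0x1141bf): `get8_packet`, the packet type test (`cmp eax, 5`), `error(f, 0x14)`
on the stub, `i = 0` from the literal-0 slot `[R+24H]` (Z24): from the cut assertion at `cut71` to the loop head `cut76` with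
`r13 = 0`, or to the epilogue. -/
theorem seg9b (Lay : Layout) (hLay : Lay.hi = 0x1000000) (μ : Microarch) (hμ : UserX.MicroOK μ) (u₀ : State)
    (hcode : HasCodeNat Lay u₀ Vorbis.L.start_decoder.entry Vorbis.Code.code_start_decoder.nat Vorbis.L.start_decoder.size)
    (h_g8 : ∀ (others : List Obj) (frames : List (Nat × FrameLayout)) (Blk : Block → Prop) (len : Nat),
      Calls Lay μ Vorbis.WayInv (Vorbis.conv u₀) Vorbis.L.get8_packet.entry (Vorbis.Spec.get8_packet.spec others frames Blk len))
    (h_err : ∀ (others : List Obj) (frames : List (Nat × FrameLayout)),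
      Calls Lay μ Vorbis.WayInv (Vorbis.conv u₀) Vorbis.L.error.entry (Vorbis.Spec.error.spec others frames))
    (g : Ghost) (A : Arena × List Obj) (v : State) (hb : In9 u₀ g Vorbis.L.start_decoder.cut71 A v) :
    ReachVia Lay μ WayInv v (fun w =>
      (∃ A, In9 u₀ g Vorbis.L.start_decoder.cut76 A w ∧ w.reg .r13 = 0) ∨ AtERR u₀ g w) := by
  have he := hb.frame.entry
  v_entry he
  simp only [depth] at he_room he_stack
  have hlay := layout_facts hb.frame hb.hand hb.sd
  have eRA : g.RA = (g.e.reg .rsp).toNat := rfl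
  have ef : g.f = (g.e.reg .rdi).toNat := rfl
  rw [eRA, ef] at hlay
  obtain ⟨hRA, hR8, _, _, hfstack, hflo, hfhi, hflog, hfcrc, hfout, hAstack, hAcrc, hAhi, hAlo⟩ := hlay
  have w_rip := hb.frame.rip
  have w_rsp : v.reg .rsp = g.e.reg .rsp - 1480 := by
    rw [hb.frame.rsp]
    apply UInt64.toNat_inj.mp
    rw [toNat_addr _ (by omega)]
    u_omega
  have w_rbp : v.reg .rbp = g.e.reg .rdi := by
    rw [hb.rbp]
    exact addr_toNat _
  have hRw : g.e.reg .rsp - 1480 = addr g.R := by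
    rw [← w_rsp]
    exact hb.frame.rsp
  have c_rsp := w_rsp
  have c_rbp := w_rbp
  have w_eq : Mem.EqOn Vorbis.L.textLo Vorbis.L.textHi u₀.mem v.mem := hb.frame.code
  have hdf : v.flags .df = false := (show abiInv _ from hb.frame.inv).1
  have hmx : v.mxcsr &&& 0x1F80 = 0x1F80 := (show abiInv _ from hb.frame.inv).2
  have hsse := Vorbis.sseOK_of_abiInv hb.frame.inv
  have henvR : ReaderEnv A.2 g.frames' (g.Blk A) g.len g.f := readerEnv hb.hand hb.sd.env.live
  have hobjL : LiveIn A.2 g.frames' g.f Off.sizeof.stb_vorbis := hb.hand.obj.mono (sub_frames' g A)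
  have hg8' := h_g8 A.2 g.frames' (g.Blk A) g.len
  have herr' := h_err A.2 g.frames'
  u_walk hcode [hμ.vendor] span [Vorbis.L.textLo, Vorbis.L.textHi] side (v_side)
  case call_inv =>
    v_inv
  case pre_11419c =>
    have hun : ShadowUntouched v.mem s_11419c.mem := by v_untouched
    have hrsp8 : (s_11419c.reg .rsp).toNat + 8 = g.R := by
      rw [w_rsp]
      u_omega
    refine ⟨⟨?_, hb.frame.offText⟩, ?_, ?_⟩
    · rw [hrsp8]
      exact hb.frame.shadow.untouched hun
    · rw [w_rdi, ← ef]
      exact henvR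
    · rw [w_rdi, ← ef, w_mem]
      have hlt : (g.e.reg Reg.rsp - 1488).toNat + 8 ≤ 2 ^ 64 := by u_omega
      exact (Reader.store_off_obj hb.sd.bits _ 8 _ hlt (by u_omega)).1.bits
  -- after get8_packet (0x1141a1)
  v_after_call w_rsp_11419c w_mem_11419c
  simp only [w_rdi_11419c] at w_same
  have hpost1 : Get8PacketPost (g.Blk A) g.len (s_11419c.reg .rdi).toNat s_11419c s_11419cr := w_post
  rw [w_rdi_11419c, ← ef] at hpost1
  obtain ⟨z1, w_rax⟩ : ∃ z, s_11419cr.reg .rax = z := ⟨_, rfl⟩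
  have hun1 : ShadowUntouched v.mem s_11419cr.mem := by v_untouched
  have hsame1 : Mem.SameExcept
      [⟨(g.e.reg .rsp).toNat - 1888, (g.e.reg .rsp).toNat - 1480⟩,
       ⟨(g.e.reg .rsp).toNat - 1320, (g.e.reg .rsp).toNat - 1314⟩,
       ⟨(g.e.reg .rdi).toNat + 48, (g.e.reg .rdi).toNat + 56⟩, ⟨(g.e.reg .rdi).toNat + 84, (g.e.reg .rdi).toNat + 96⟩,
       ⟨(g.e.reg .rdi).toNat + 136, (g.e.reg .rdi).toNat + 144⟩, ⟨(g.e.reg .rdi).toNat + 1484, (g.e.reg .rdi).toNat + 1749⟩,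
       ⟨(g.e.reg .rdi).toNat + 1752, (g.e.reg .rdi).toNat + 1784⟩,
       ⟨0x121c00, 0x121c00 + 1024⟩] v.mem s_11419cr.mem := by
    u_same
  have hbits1 : Bits (g.Blk A) g.len s_11419cr.mem g.f := hpost1.reader.bits
  u_walk hcode [hμ.vendor] until [Vorbis.L.start_decoder.cut4, Vorbis.L.start_decoder.cut76] span [Vorbis.L.textLo, Vorbis.L.textHi] side (v_side)
  case call_inv =>
    v_inv
  case pre_1141c7 =>
    -- error(f, 0x14): the shadow clause and `*f` inside one live object
    have hun : ShadowUntouched v.mem s_1141c7.mem := by v_untouched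
    have hrsp8 : (s_1141c7.reg .rsp).toNat + 8 = g.R := by
      rw [w_rsp]
      u_omega
    refine ⟨⟨?_, hb.frame.offText⟩, ?_⟩
    · rw [hrsp8]
      exact hb.frame.shadow.untouched hun
    · rw [w_rdi, ← ef]
      exact hobjL
  case cont =>
    -- the stub 0x1141bf: after error (0x1141cc)
    v_after_call w_rsp_1141c7 w_mem_1141c7
    simp only [w_rdi_1141c7] at w_same
    have hun2 : ShadowUntouched v.mem s_1141c7r.mem := by v_untouched
    have hlt : (g.e.reg Reg.rsp - 1488).toNat + 8 ≤ 2 ^ 64 := by u_omega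
    have hsameA : Mem.SameExcept
        [⟨(g.e.reg .rsp).toNat - 1888, (g.e.reg .rsp).toNat - 1480⟩,
       ⟨(g.e.reg .rsp).toNat - 1320, (g.e.reg .rsp).toNat - 1314⟩,
       ⟨(g.e.reg .rdi).toNat + 48, (g.e.reg .rdi).toNat + 56⟩, ⟨(g.e.reg .rdi).toNat + 84, (g.e.reg .rdi).toNat + 96⟩,
       ⟨(g.e.reg .rdi).toNat + 136, (g.e.reg .rdi).toNat + 144⟩, ⟨(g.e.reg .rdi).toNat + 1484, (g.e.reg .rdi).toNat + 1749⟩,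
       ⟨(g.e.reg .rdi).toNat + 1752, (g.e.reg .rdi).toNat + 1784⟩,
       ⟨0x121c00, 0x121c00 + 1024⟩] v.mem (s_11419cr.mem.writeLE (g.e.reg Reg.rsp - 1488) 8 1130956) := by
      u_same
    have hsame2 : Mem.SameExcept
        [⟨(g.e.reg .rsp).toNat - 1888, (g.e.reg .rsp).toNat - 1480⟩,
       ⟨(g.e.reg .rsp).toNat - 1320, (g.e.reg .rsp).toNat - 1314⟩,
       ⟨(g.e.reg .rdi).toNat + 48, (g.e.reg .rdi).toNat + 56⟩, ⟨(g.e.reg .rdi).toNat + 84, (g.e.reg .rdi).toNat + 96⟩,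
       ⟨(g.e.reg .rdi).toNat + 136, (g.e.reg .rdi).toNat + 144⟩, ⟨(g.e.reg .rdi).toNat + 1484, (g.e.reg .rdi).toNat + 1749⟩,
       ⟨(g.e.reg .rdi).toNat + 1752, (g.e.reg .rdi).toNat + 1784⟩,
       ⟨0x121c00, 0x121c00 + 1024⟩] v.mem s_1141c7r.mem := by
      refine Vorbis.Spec.Reader.sameExcept_through_callee hsameA w_same ?_
      simp only [List.forall_mem_cons, List.not_mem_nil, false_imp_iff, implies_true, and_true, X86.User.inSpans_cons,
        X86.User.inSpans_nil, or_false]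
      repeat' apply And.intro
      all_goals u_omega
    have hbits2 : Bits (g.Blk A) g.len s_1141c7r.mem g.f := by
      have hb1 := (Reader.store_off_obj hbits1 (g.e.reg Reg.rsp - 1488) 8 1130956 hlt (by u_omega)).1.bits
      refine bits_miss hb1 w_same ?_
      simp only [List.forall_mem_cons, List.not_mem_nil, false_imp_iff, implies_true, and_true]
      repeat' apply And.intro
      all_goals u_omega
    have w_rax : s_1141c7r.reg .rax = 0 := w_post.1
    u_walk hcode [hμ.vendor] until [Vorbis.L.start_decoder.cut4] span [Vorbis.L.textLo, Vorbis.L.textHi] side (v_side)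
    refine ReachVia.done (Or.inr ?_)
    have hsameE : Mem.SameExcept
        [⟨(g.e.reg .rsp).toNat - 1888, (g.e.reg .rsp).toNat - 1480⟩,
       ⟨(g.e.reg .rsp).toNat - 1320, (g.e.reg .rsp).toNat - 1314⟩,
       ⟨(g.e.reg .rdi).toNat + 48, (g.e.reg .rdi).toNat + 56⟩, ⟨(g.e.reg .rdi).toNat + 84, (g.e.reg .rdi).toNat + 96⟩,
       ⟨(g.e.reg .rdi).toNat + 136, (g.e.reg .rdi).toNat + 144⟩, ⟨(g.e.reg .rdi).toNat + 1484, (g.e.reg .rdi).toNat + 1749⟩,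
       ⟨(g.e.reg .rdi).toNat + 1752, (g.e.reg .rdi).toNat + 1784⟩,
       ⟨0x121c00, 0x121c00 + 1024⟩] v.mem s_1141cc.mem := by
      rw [w_mem]
      exact hsame2
    have hinvE : abiInv s_1141cc := by v_inv
    have hraxE : (s_1141cc.reg .rax).toNat % 2 ^ 32 = 0 := by
      rw [w_rax]
      rfl
    exact err_exit hb hsameE (by rw [w_mem]; exact hun2) (by rw [w_mem]; exact hbits2) w_rip
      (by rw [w_rsp]; exact hRw) w_eq hinvE hraxE
  -- the packet type is 5: `i = 0` from the literal-0 slot [R+24H] (Z24), on to the loop head 0x1141f7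
  refine ReachVia.done (Or.inl ⟨A, ?_, ?_⟩)
  · have hsameE : Mem.SameExcept
        [⟨(g.e.reg .rsp).toNat - 1888, (g.e.reg .rsp).toNat - 1480⟩,
       ⟨(g.e.reg .rsp).toNat - 1320, (g.e.reg .rsp).toNat - 1314⟩,
       ⟨(g.e.reg .rdi).toNat + 48, (g.e.reg .rdi).toNat + 56⟩, ⟨(g.e.reg .rdi).toNat + 84, (g.e.reg .rdi).toNat + 96⟩,
       ⟨(g.e.reg .rdi).toNat + 136, (g.e.reg .rdi).toNat + 144⟩, ⟨(g.e.reg .rdi).toNat + 1484, (g.e.reg .rdi).toNat + 1749⟩,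
       ⟨(g.e.reg .rdi).toNat + 1752, (g.e.reg .rdi).toNat + 1784⟩,
       ⟨0x121c00, 0x121c00 + 1024⟩] v.mem s_1141ab.mem := by
      rw [w_mem]
      exact hsame1
    have hinvE : abiInv s_1141ab := by v_inv
    have hrbpE : s_1141ab.reg .rbp = addr g.f := by
      rw [w_kept .rbp rfl]
      exact hb.rbp
    exact mid_exit hb hsameE (by rw [w_mem]; exact hun1) (by rw [w_mem]; exact hbits1) w_rip
      (by rw [w_rsp]; exact hRw) w_eq hinvE hrbpE
  · rw [w_r13]
    have ea : g.e.reg Reg.rsp - 1444 = addr (g.R + 0x24) := by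
      apply UInt64.toNat_inj.mp
      rw [toNat_addr _ (by omega)]
      u_omega
    have hz : s_11419cr.mem.readLE (g.e.reg Reg.rsp - 1444) 4 = 0 := by
      have h0 : v.mem.readLE (addr (g.R + 0x24)) 4 = 0 := hb.sd.frame.z24 (by omega) (by omega)
      rw [ea, ← h0]
      apply hsame1.readLE _ _ (by rw [toNat_addr _ (by omega)]; omega)
      rw [toNat_addr _ (by omega)]
      simp only [List.forall_mem_cons, List.not_mem_nil, false_imp_iff, implies_true, and_true]
      repeat' apply And.intro
      all_goals omega
    rw [hz]
    rfl

end Vorbis.Spec.start_decoder_9b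

/-- **Unit `start_decoder.9b`** (0x114199 … 0x1141ab + the stub 0x1141bf: the packet type): the walk `seg9b` above. -/
theorem Vorbis.Spec.Worked.start_decoder_9b_ok : Vorbis.Spec.start_decoder_9b.Statement := by
  intro Lay hLay μ hμ u₀ hcode h_get8_packet h_error g A v hb
  exact Vorbis.Spec.start_decoder_9b.seg9b Lay hLay μ hμ u₀ hcode h_get8_packet h_error g A v hb
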